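-- pv_equiv track=rewrite | github.com/okara83/Becoming-a-Data-Scientist | Data Science and Machine Learning/Machine-Learning-In-Python-THOROUGH/EXAMPLES/EDABIT/EXPERT/001_100/80_diamond_sum.py | diamond_sum
-- ===== SOURCE A (Python) =====
-- def diamond_sum(n):
--
--     if n==1:return 1
--     else:
--         a,b=[],[]
--         for i in range(n):
--             a.append([])
--             for j in range(n):
--                 a[i].append(i*n+1+j)
--         b.append(a[0][n//2])
--         for i in range(1,n//2):
--             b.append(a[i][n//2-i])
--             b.append(a[i][-n//2+i])
--         b.append(a[n//2][0])
--         b.append(a[n//2][-1])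
--         for i in range(n//2+1,n-1):
--             b.append(a[i][i-3])
--             b.append(a[i][-i+2])
--         b.append(a[n-1][n//2])
--
--     return (sum(b))
-- ===== SOURCE B (Python) =====
-- def diamond_sum(n):
--     # O(1) closed form: sum each group of diamond cells (value of cell (i,j) is i*n+1+j)
--     # directly instead of building the n*n grid.
--     if n == 1:
--         return 1
--     h = n // 2
--     # upper pairs, rows 1..h-1: column indices sum to n-1 (odd n) or n (even n)
--     pair_cols_up = n - 1 if n % 2 else n
--     up = 2 * n * (h * (h - 1) // 2) + (2 + pair_cols_up) * (h - 1)
--     # lower pairs, rows h+1..n-2: column indices sum to n-1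
--     lo_cnt = max(n - 2 - h, 0)
--     lo_rows = (n - 2) * (n - 1) // 2 - h * (h + 1) // 2 if lo_cnt > 0 else 0
--     lo = 2 * n * lo_rows + (n + 1) * lo_cnt
--     # single cells: top, middle-left, middle-right, bottom
--     singles = (1 + h) + (h * n + 1) + (h * n + n) + ((n - 1) * n + 1 + h)
--     return up + lo + singles
-- ===== Notes on version B (the rewrite author's own statement) =====
-- stated objective: faster
-- what changed: B replaces A's O(n^2) construction of the full n x n grid plus per-cell index lookups with a closed-form O(1) computation: the four single diamond cells and the two arithmetic-progression row ranges (upper and lower pair rows, whose paired column indices add to a constant) are summed directly by formula.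
import Mathlib
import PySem

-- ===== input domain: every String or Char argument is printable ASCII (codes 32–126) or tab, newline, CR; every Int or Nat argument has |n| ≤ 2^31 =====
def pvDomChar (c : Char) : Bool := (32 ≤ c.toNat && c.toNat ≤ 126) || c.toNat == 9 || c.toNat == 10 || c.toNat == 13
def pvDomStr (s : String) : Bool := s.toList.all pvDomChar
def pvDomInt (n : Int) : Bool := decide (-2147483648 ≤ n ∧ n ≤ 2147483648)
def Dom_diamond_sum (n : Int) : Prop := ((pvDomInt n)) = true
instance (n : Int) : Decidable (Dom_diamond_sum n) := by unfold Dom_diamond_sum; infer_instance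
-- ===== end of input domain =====

-- B replaces A's O(n^2) grid construction by an O(1) closed-form sum of the diamond cells.

-- ===== PORT A =====
def diamond_sum (n : Int) : Int :=
  if n == 1 then 1
  else
    -- a: the n×n grid, built row by row; a[i].append(x) is ported as set at index i
    let a : List (List Int) :=
      (PySem.List.pyRange 0 n 1).foldl
        (fun a i =>
          let a := a ++ [([] : List Int)]
          (PySem.List.pyRange 0 n 1).foldl
            (fun a j => a.set i.toNat (PySem.List.pyGetD a i [] ++ [i * n + 1 + j])) a)
        []
    -- Python a[i][j] raises IndexError outside range; Pre_ restricts to 1 ≤ n where all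
    -- indices are in range, so the getD defaults are never the value used
    let b : List Int := [PySem.List.pyGetD (PySem.List.pyGetD a 0 []) (PySem.Int.floordiv n 2) 0]
    let b :=
      (PySem.List.pyRange 1 (PySem.Int.floordiv n 2) 1).foldl
        (fun b i =>
          let b := b ++ [PySem.List.pyGetD (PySem.List.pyGetD a i []) (PySem.Int.floordiv n 2 - i) 0]
          b ++ [PySem.List.pyGetD (PySem.List.pyGetD a i []) (PySem.Int.floordiv (-n) 2 + i) 0])
        b
    let b := b ++ [PySem.List.pyGetD (PySem.List.pyGetD a (PySem.Int.floordiv n 2) []) 0 0]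
    let b := b ++ [PySem.List.pyGetD (PySem.List.pyGetD a (PySem.Int.floordiv n 2) []) (-1) 0]
    let b :=
      (PySem.List.pyRange (PySem.Int.floordiv n 2 + 1) (n - 1) 1).foldl
        (fun b i =>
          let b := b ++ [PySem.List.pyGetD (PySem.List.pyGetD a i []) (i - 3) 0]
          b ++ [PySem.List.pyGetD (PySem.List.pyGetD a i []) (-i + 2) 0])
        b
    let b := b ++ [PySem.List.pyGetD (PySem.List.pyGetD a (n - 1) []) (PySem.Int.floordiv n 2) 0]
    b.sum

-- ===== PORT B =====
def diamond_sum_alt (n : Int) : Int :=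
  if n == 1 then 1
  else
    let h := PySem.Int.floordiv n 2
    let pairColsUp := if PySem.Int.mod n 2 ≠ 0 then n - 1 else n
    let up := 2 * n * PySem.Int.floordiv (h * (h - 1)) 2 + (2 + pairColsUp) * (h - 1)
    let loCnt := max (n - 2 - h) 0
    let loRows :=
      if loCnt > 0 then
        PySem.Int.floordiv ((n - 2) * (n - 1)) 2 - PySem.Int.floordiv (h * (h + 1)) 2
      else 0
    let lo := 2 * n * loRows + (n + 1) * loCnt
    let singles := (1 + h) + (h * n + 1) + (h * n + n) + ((n - 1) * n + 1 + h)
    up + lo + singles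

-- ===== PRECONDITION & SPEC =====
-- Pre_ excludes exactly the non-positive n, on which the Python A raises IndexError (indexing an empty grid); B returns a value there that is not claimed
def Pre_diamond_sum (n : Int) : Prop := 1 ≤ n
instance (n : Int) : Decidable (Pre_diamond_sum n) := by unfold Pre_diamond_sum; infer_instance
def pvWitness_diamond_sum : Int := (3)

def Spec_diamond_sum (n : Int) (out : Int) : Prop := out = diamond_sum_alt n
instance (n : Int) (out : Int) : Decidable (Spec_diamond_sum n out) := by unfold Spec_diamond_sum; infer_instance

-- ===== CLAIM (what is proved, stated in full; the proofs are below) =====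
def Claim_equal_diamond_sum : Prop := ∀ (n : Int), Dom_diamond_sum n → Pre_diamond_sum n → Spec_diamond_sum n (diamond_sum n)

-- ===== LEMMAS AND PROOFS =====

-- sum of an affine map over a list
theorem pv_sum_affine (l : List Int) (p q : Int) :
    (l.map (fun i => p * i + q)).sum = p * l.sum + (l.length : Int) * q := by
  induction l with
  | nil => simp
  | cons x t ih => simp [ih]; ring

-- floor division of a doubled integer by 2
theorem pv_half (x s : Int) (hx : 2 * s = x) : PySem.Int.floordiv x 2 = s := by
  rw [← hx, PySem.Int.floordiv_eq_ediv_of_pos (by norm_num)]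
  omega

-- Gauss: twice the sum of range(a, b)
theorem pv_sum_pyRange_two (a b : Int) (h : a ≤ b) :
    2 * (PySem.List.pyRange a b 1).sum = (b - a) * (a + b - 1) := by
  obtain ⟨m, hm⟩ : ∃ m : Nat, b = a + m := ⟨(b - a).toNat, by omega⟩
  subst hm
  clear h
  induction m with
  | zero => simp [PySem.List.pyRange_one_eq_nil]
  | succ k ih =>
    have hsplit : PySem.List.pyRange a (a + (k + 1 : Nat)) 1
        = PySem.List.pyRange a (a + k) 1 ++ [a + k] := by
      rw [show a + ((k + 1 : Nat) : Int) = (a + k) + 1 by push_cast; ring]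
      exact PySem.List.pyRange_one_succ_right (by omega)
    rw [hsplit, List.sum_append]
    simp only [List.sum_cons, List.sum_nil]
    push_cast
    push_cast at ih
    linear_combination ih

theorem pv_set_concat {α : Type} (a : List α) (x v : α) :
    (a ++ [x]).set a.length v = a ++ [v] := by
  induction a with
  | nil => rfl
  | cons y t ih => simp [List.set_cons_succ, ih]

theorem pv_set_concat' {α : Type} (a : List α) (x v : α) (k : Nat) (h : a.length = k) :
    (a ++ [x]).set k v = a ++ [v] := by subst h; exact pv_set_concat a x v

theorem pv_inner (n : Int) (l : List Int) :
    ∀ (a : List (List Int)) (i : Int), 0 ≤ i → i.toNat < a.length →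
      l.foldl (fun a j => a.set i.toNat (PySem.List.pyGetD a i [] ++ [i * n + 1 + j])) a
        = a.set i.toNat (PySem.List.pyGetD a i [] ++ l.map (fun j => i * n + 1 + j)) := by
  induction l with
  | nil =>
    intro a i hi hlen
    simp only [List.foldl_nil, List.map_nil, List.append_nil]
    rw [PySem.List.pyGetD_eq_getElem a [] (by omega) (by omega)]
    exact (List.set_getElem_self hlen).symm
  | cons x t ih =>
    intro a i hi hlen
    simp only [List.foldl_cons, List.map_cons]
    rw [ih _ i hi (by simpa using hlen)]
    have hg : PySem.List.pyGetD (a.set i.toNat (PySem.List.pyGetD a i [] ++ [i * n + 1 + x])) i []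
        = PySem.List.pyGetD a i [] ++ [i * n + 1 + x] := by
      rw [PySem.List.pyGetD_eq_getElem _ [] (by omega) (by simp; omega)]
      simp [List.getElem_set_self]
    rw [hg, List.set_set]
    simp

theorem pv_grid_aux (n : Int) :
    ∀ (m k : Nat), ((n : Int) - k).toNat = m → (k : Int) ≤ n →
      (PySem.List.pyRange k n 1).foldl
          (fun a i =>
            let a := a ++ [([] : List Int)]
            (PySem.List.pyRange 0 n 1).foldl
              (fun a j => a.set i.toNat (PySem.List.pyGetD a i [] ++ [i * n + 1 + j])) a)
          ((PySem.List.pyRange 0 k 1).map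
            (fun i => (PySem.List.pyRange 0 n 1).map (fun j => i * n + 1 + j)))
        = (PySem.List.pyRange 0 n 1).map
            (fun i => (PySem.List.pyRange 0 n 1).map (fun j => i * n + 1 + j)) := by
  intro m
  induction m with
  | zero =>
    intro k hm hk
    have hkn : (k : Int) = n := by omega
    rw [PySem.List.pyRange_one_eq_nil (le_of_eq hkn.symm), List.foldl_nil, hkn]
  | succ p ih =>
    intro k hm hk
    have hklt : (k : Int) < n := by omega
    rw [PySem.List.pyRange_one_cons hklt, List.foldl_cons]
    have hstep :
        (let a := ((PySem.List.pyRange 0 k 1).map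
            (fun i => (PySem.List.pyRange 0 n 1).map (fun j => i * n + 1 + j))) ++ [([] : List Int)]
         (PySem.List.pyRange 0 n 1).foldl
           (fun a j => a.set (k : Int).toNat (PySem.List.pyGetD a (k : Int) [] ++ [(k : Int) * n + 1 + j])) a)
        = (PySem.List.pyRange 0 (k + 1 : Nat) 1).map
            (fun i => (PySem.List.pyRange 0 n 1).map (fun j => i * n + 1 + j)) := by
      have hlen : ((PySem.List.pyRange 0 k 1).map
          (fun i => (PySem.List.pyRange 0 n 1).map (fun j => i * n + 1 + j))).length = k := by
        simp [PySem.List.length_pyRange_one]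
      simp only
      rw [pv_inner n _ _ (k : Int) (by omega) (by simp [hlen])]
      have hget : PySem.List.pyGetD (((PySem.List.pyRange 0 k 1).map
          (fun i => (PySem.List.pyRange 0 n 1).map (fun j => i * n + 1 + j))) ++ [([] : List Int)])
          (k : Int) [] = [] := by
        rw [PySem.List.pyGetD_eq_getElem _ [] (by omega) (by simp [hlen])]
        simp [hlen]
      rw [hget, Int.toNat_natCast, List.nil_append, pv_set_concat' _ _ _ k hlen]
      have hsr : PySem.List.pyRange ((0:Int)) ((k + 1 : Nat) : Int) 1
          = PySem.List.pyRange 0 (k : Int) 1 ++ [(k : Int)] := by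
        rw [show ((k + 1 : Nat) : Int) = (k : Int) + 1 by push_cast; ring]
        exact PySem.List.pyRange_one_succ_right (by omega)
      rw [hsr, List.map_append]
      simp
    rw [hstep]
    exact ih (k + 1) (by omega) (by omega)

theorem pv_grid (n : Int) (hn : 1 ≤ n) :
    ((PySem.List.pyRange 0 n 1).foldl
        (fun a i =>
          let a := a ++ [([] : List Int)]
          (PySem.List.pyRange 0 n 1).foldl
            (fun a j => a.set i.toNat (PySem.List.pyGetD a i [] ++ [i * n + 1 + j])) a)
        [])
      = (PySem.List.pyRange 0 n 1).map
          (fun i => (PySem.List.pyRange 0 n 1).map (fun j => i * n + 1 + j)) := by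
  have := pv_grid_aux n n.toNat 0 (by omega) (by omega)
  simpa [PySem.List.pyRange_one_eq_nil] using this

theorem pv_row (n i : Int) (hi0 : 0 ≤ i) (hin : i < n) :
    PySem.List.pyGetD
        ((PySem.List.pyRange 0 n 1).map
          (fun i => (PySem.List.pyRange 0 n 1).map (fun j => i * n + 1 + j))) i []
      = (PySem.List.pyRange 0 n 1).map (fun j => i * n + 1 + j) :=
  PySem.List.pyGetD_map_pyRange_of_nonneg _ n i [] hi0 hin

theorem pv_cell_nonneg (n i j : Int) (hi0 : 0 ≤ i) (hin : i < n) (hj0 : 0 ≤ j) (hjn : j < n) :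
    PySem.List.pyGetD
        (PySem.List.pyGetD
          ((PySem.List.pyRange 0 n 1).map
            (fun i => (PySem.List.pyRange 0 n 1).map (fun j => i * n + 1 + j))) i []) j 0
      = i * n + 1 + j := by
  rw [pv_row n i hi0 hin]
  exact PySem.List.pyGetD_map_pyRange_of_nonneg _ n j 0 hj0 hjn

theorem pv_cell_neg (n i j : Int) (hi0 : 0 ≤ i) (hin : i < n) (hj0 : -n ≤ j) (hjn : j < 0) :
    PySem.List.pyGetD
        (PySem.List.pyGetD
          ((PySem.List.pyRange 0 n 1).map
            (fun i => (PySem.List.pyRange 0 n 1).map (fun j => i * n + 1 + j))) i []) j 0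
      = i * n + 1 + (n + j) := by
  rw [pv_row n i hi0 hin]
  obtain ⟨m, rfl⟩ : ∃ m : Nat, n = (m : Int) := ⟨n.toNat, by omega⟩
  have hk : j = -(((-j).toNat : Nat) : Int) := by omega
  have hlen : ((PySem.List.pyRange 0 (m : Int) 1).map (fun j => i * (m : Int) + 1 + j)).length = m := by
    simp [PySem.List.length_pyRange_one]
  have hget := PySem.List.pyGet?_neg_natCast
      ((PySem.List.pyRange 0 (m : Int) 1).map (fun j => i * (m : Int) + 1 + j)) (-j).toNat
      (by omega) (by rw [hlen]; omega)
  rw [← hk, hlen] at hget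
  have helt : ((PySem.List.pyRange 0 (m : Int) 1).map (fun j => i * (m : Int) + 1 + j))[m - (-j).toNat]?
      = some (i * (m : Int) + 1 + ((m - (-j).toNat : Nat) : Int)) :=
    PySem.List.getElem?_map_pyRange_zero _ m (m - (-j).toNat) (by omega)
  have hfin : PySem.List.pyGetD ((PySem.List.pyRange 0 (m : Int) 1).map (fun j => i * (m : Int) + 1 + j)) j 0
      = i * (m : Int) + 1 + ((m - (-j).toNat : Nat) : Int) := by
    simp [PySem.List.pyGetD, hget, helt]
  rw [hfin]
  congr 1
  omega

theorem pv_foldl_pair_sum (l : List Int) (f g : Int → Int) :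
    ∀ (b : List Int), (l.foldl (fun b i => b ++ [f i, g i]) b).sum
      = b.sum + (l.map (fun i => f i + g i)).sum := by
  induction l with
  | nil => intro b; simp
  | cons x t ih =>
    intro b
    rw [List.foldl_cons, ih, List.sum_append, List.map_cons, List.sum_cons]
    simp
    ring

theorem pv_main (n : Int) (h5 : 5 ≤ n) : diamond_sum n = diamond_sum_alt n := by
  have hne : (n == 1) = false := by simp; omega
  have hdm := PySem.Int.floordiv_mul_add_mod n 2
  have hr0 := PySem.Int.mod_nonneg n (b := 2) (by norm_num)
  have hr2 := PySem.Int.mod_lt n (b := 2) (by norm_num)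
  set h := PySem.Int.floordiv n 2 with hh
  set r := PySem.Int.mod n 2 with hr
  have hn2 : h * 2 + r = n := hdm
  have hh2 : 2 ≤ h := by omega
  have hneg : PySem.Int.floordiv (-n) 2 = -h - r := by
    rw [PySem.Int.floordiv_eq_iff_of_pos (by norm_num)]
    constructor <;> omega
  have hS1 := pv_sum_pyRange_two 1 h (by omega)
  have hS2 := pv_sum_pyRange_two (h + 1) (n - 1) (by omega)
  have hU := pv_sum_pyRange_two 0 (n - 1) (by omega)
  have hV := pv_sum_pyRange_two 0 (h + 1) (by omega)
  have hsplit : (PySem.List.pyRange 0 (n - 1) 1).sum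
      = (PySem.List.pyRange 0 (h + 1) 1).sum + (PySem.List.pyRange (h + 1) (n - 1) 1).sum := by
    rw [PySem.List.pyRange_one_append 0 (h + 1) (n - 1) (by omega) (by omega), List.sum_append]
  -- evaluate A
  rw [diamond_sum, diamond_sum_alt, hne]
  simp only [Bool.false_eq_true, if_false]
  rw [pv_grid n (by omega)]
  rw [pv_cell_nonneg n 0 h (by omega) (by omega) (by omega) (by omega)]
  rw [pv_cell_nonneg n h 0 (by omega) (by omega) (by omega) (by omega)]
  rw [pv_cell_neg n h (-1) (by omega) (by omega) (by omega) (by omega)]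
  rw [pv_cell_nonneg n (n - 1) h (by omega) (by omega) (by omega) (by omega)]
  rw [hneg]
  -- the upper loop: replace grid lookups by their values
  rw [PySem.List.foldl_congr_mem (PySem.List.pyRange 1 h 1) _
      (fun b i => b ++ [i * n + 1 + (h - i), i * n + 1 + (n + (-h - r + i))]) _
      (by
        intro acc i hi
        rw [PySem.List.mem_pyRange_one] at hi
        simp only
        rw [pv_cell_nonneg n i (h - i) (by omega) (by omega) (by omega) (by omega)]
        rw [pv_cell_neg n i (-h - r + i) (by omega) (by omega) (by omega) (by omega)]
        rw [List.append_assoc]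
        rfl)]
  -- the lower loop
  rw [PySem.List.foldl_congr_mem (PySem.List.pyRange (h + 1) (n - 1) 1) _
      (fun b i => b ++ [i * n + 1 + (i - 3), i * n + 1 + (n + (-i + 2))]) _
      (by
        intro acc i hi
        rw [PySem.List.mem_pyRange_one] at hi
        simp only
        rw [pv_cell_nonneg n i (i - 3) (by omega) (by omega) (by omega) (by omega)]
        rw [pv_cell_neg n i (-i + 2) (by omega) (by omega) (by omega) (by omega)]
        rw [List.append_assoc]
        rfl)]
  -- turn the loops into sums
  rw [List.sum_append, pv_foldl_pair_sum, List.sum_append, List.sum_append, pv_foldl_pair_sum]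
  -- affine sums over the ranges
  rw [List.map_congr_left (l := PySem.List.pyRange 1 h 1)
      (g := fun i => (2 * n) * i + (2 + n - r)) (by intro i hi; ring)]
  rw [List.map_congr_left (l := PySem.List.pyRange (h + 1) (n - 1) 1)
      (g := fun i => (2 * n) * i + (n + 1)) (by intro i hi; ring)]
  rw [pv_sum_affine, pv_sum_affine, PySem.List.length_pyRange_one, PySem.List.length_pyRange_one]
  have hl1 : (((h - 1).toNat : Nat) : Int) = h - 1 := by omega
  have hl2 : (((n - 1 - (h + 1)).toNat : Nat) : Int) = n - h - 2 := by omega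
  rw [hl1, hl2]
  -- evaluate B's closed form
  have hpc : (if r ≠ 0 then n - 1 else n) = n - r := by
    rcases (by omega : r = 0 ∨ r = 1) with h0 | h1
    · simp [h0]
    · simp [h1]
  rw [hpc]
  rw [pv_half (h * (h - 1)) (PySem.List.pyRange 1 h 1).sum (by linear_combination hS1)]
  rw [pv_half ((n - 2) * (n - 1)) (PySem.List.pyRange 0 (n - 1) 1).sum (by linear_combination hU)]
  rw [pv_half (h * (h + 1)) (PySem.List.pyRange 0 (h + 1) 1).sum (by linear_combination hV)]
  have hmax : max (n - 2 - h) 0 = n - 2 - h := max_eq_left (by omega)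
  rw [hmax, if_pos (by omega)]
  simp only [List.sum_cons, List.sum_nil]
  linear_combination (-2 * n) * hsplit

-- ===== VERDICT (by name: the statement is the Claim_ definition above) =====
theorem diamond_sum_spec : Claim_equal_diamond_sum := by
  intro n _ hpre
  unfold Spec_diamond_sum
  by_cases hge : 5 ≤ n
  · exact pv_main n hge
  · have h1 : 1 ≤ n := hpre
    have h4 : n ≤ 4 := by omega
    interval_cases n <;> decide
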